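-- pv_equiv track=rewrite | github.com/tpgh02/algo-study | WEEK_9/BOJ_6236/gyuri.py | find_min_withdrawal
-- ===== SOURCE A (Python) =====
-- def find_min_withdrawal(lt, rt, daily, n, m):
--     if lt > rt:
--         return lt
--
--     mid = (lt + rt) // 2
--     charge = mid
--     num = 1
--
--     for i in range(n):
--         if charge < daily[i]:
--             charge = mid
--             num += 1
--         charge -= daily[i]
--
--     if num > m or mid < max(daily):
--         return find_min_withdrawal(mid + 1, rt, daily, n, m)
--     else:
--         return find_min_withdrawal(lt, mid - 1, daily, n, m)
-- ===== SOURCE B (Python) =====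
-- def _withdraw_count(amount, daily, n):
--     num = 1
--     charge = amount
--     for i in range(n):
--         cost = daily[i]
--         if charge < cost:
--             num += 1
--             charge = amount
--         charge -= cost
--     return num
--
--
-- def find_min_withdrawal(lt, rt, daily, n, m):
--     while lt <= rt:
--         mid = (lt + rt) // 2
--         if _withdraw_count(mid, daily, n) > m or mid < max(daily):
--             lt = mid + 1
--         else:
--             rt = mid - 1
--     return lt
-- ===== Notes on version B (the rewrite author's own statement) =====
-- stated objective: idiomatic
-- what changed: Replaces the recursive binary search with an iterative while-loop and factors the greedy feasibility count into a separate helper function.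
import Mathlib
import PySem

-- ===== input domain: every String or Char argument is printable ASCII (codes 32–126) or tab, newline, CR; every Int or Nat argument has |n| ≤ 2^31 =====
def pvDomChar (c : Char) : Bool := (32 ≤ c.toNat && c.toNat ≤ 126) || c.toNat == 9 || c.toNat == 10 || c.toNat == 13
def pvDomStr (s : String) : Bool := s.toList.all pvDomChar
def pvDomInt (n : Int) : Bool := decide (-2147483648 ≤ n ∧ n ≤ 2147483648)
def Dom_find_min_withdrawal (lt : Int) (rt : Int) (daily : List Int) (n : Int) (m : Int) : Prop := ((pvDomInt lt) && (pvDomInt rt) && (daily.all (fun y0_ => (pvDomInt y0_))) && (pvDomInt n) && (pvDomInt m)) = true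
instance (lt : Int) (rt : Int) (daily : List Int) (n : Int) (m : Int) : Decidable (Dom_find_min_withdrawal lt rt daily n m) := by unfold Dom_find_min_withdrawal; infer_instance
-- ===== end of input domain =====

-- B replaces A's recursive binary search by an iterative while-loop with the greedy
-- feasibility count factored into a helper function (objective: idiomatic; same cost).

-- ===== PORT A =====
-- literal transliteration of A's recursion; the for-loop is a foldl over range(n)
def find_min_withdrawal (lt : Int) (rt : Int) (daily : List Int) (n : Int) (m : Int) : Int :=
  if lt > rt then lt
  else
    let mid := PySem.Int.floordiv (lt + rt) 2
    let s := (PySem.List.pyRange 0 n 1).foldl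
      (fun (cn : Int × Int) i =>
        if cn.1 < PySem.List.pyGetD daily i 0 then
          (mid - PySem.List.pyGetD daily i 0, cn.2 + 1)
        else
          (cn.1 - PySem.List.pyGetD daily i 0, cn.2)) (mid, 1)
    if s.2 > m ∨ mid < (PySem.List.max? daily (fun x => x)).getD 0 then
      find_min_withdrawal (mid + 1) rt daily n m
    else
      find_min_withdrawal lt (mid - 1) daily n m
termination_by (rt - lt + 1).toNat
decreasing_by
  · have hb := PySem.Int.floordiv_two_mid_bounds (show lt ≤ rt by omega)
    omega
  · have hb := PySem.Int.floordiv_two_mid_bounds (show lt ≤ rt by omega)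
    omega

-- ===== PORT B =====
-- B's helper _withdraw_count: explicit recursion over the index list with (num, charge) state
def pvWithdrawCountGo (amount : Int) (daily : List Int) (idxs : List Int) (num : Int) (charge : Int) : Int :=
  match idxs with
  | [] => num
  | i :: rest =>
    let cost := PySem.List.pyGetD daily i 0
    if charge < cost then pvWithdrawCountGo amount daily rest (num + 1) (amount - cost)
    else pvWithdrawCountGo amount daily rest num (charge - cost)

def pvWithdrawCount (amount : Int) (daily : List Int) (n : Int) : Int :=
  pvWithdrawCountGo amount daily (PySem.List.pyRange 0 n 1) 1 amount

-- B's while-loop as tail recursion on the shrinking (lt, rt) interval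
def find_min_withdrawal_alt (lt : Int) (rt : Int) (daily : List Int) (n : Int) (m : Int) : Int :=
  if lt ≤ rt then
    let mid := PySem.Int.floordiv (lt + rt) 2
    if pvWithdrawCount mid daily n > m ∨ mid < (PySem.List.max? daily (fun x => x)).getD 0 then
      find_min_withdrawal_alt (mid + 1) rt daily n m
    else
      find_min_withdrawal_alt lt (mid - 1) daily n m
  else lt
termination_by (rt - lt + 1).toNat
decreasing_by
  · have hb := PySem.Int.floordiv_two_mid_bounds (show lt ≤ rt by omega)
    omega
  · have hb := PySem.Int.floordiv_two_mid_bounds (show lt ≤ rt by omega)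
    omega

-- ===== PRECONDITION & SPEC =====
-- Pre_ is exactly the set of inputs on which the Python A returns: with lt ≤ rt, A raises
-- IndexError when n exceeds len(daily), and ValueError at max(daily) when daily is empty
-- and the short-circuit 'num > m' (num = 1 on empty daily) does not fire, i.e. m ≥ 1.
def Pre_find_min_withdrawal (lt : Int) (rt : Int) (daily : List Int) (n : Int) (m : Int) : Prop :=
  lt > rt ∨ (n ≤ (daily.length : Int) ∧ (daily ≠ [] ∨ m < 1))
instance (lt : Int) (rt : Int) (daily : List Int) (n : Int) (m : Int) : Decidable (Pre_find_min_withdrawal lt rt daily n m) := by unfold Pre_find_min_withdrawal; infer_instance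

def pvWitness_find_min_withdrawal : Int × Int × List Int × Int × Int := (1, 10, [3, 1, 4], 3, 2)

def Spec_find_min_withdrawal (lt : Int) (rt : Int) (daily : List Int) (n : Int) (m : Int) (out : Int) : Prop := out = find_min_withdrawal_alt lt rt daily n m
instance (lt : Int) (rt : Int) (daily : List Int) (n : Int) (m : Int) (out : Int) : Decidable (Spec_find_min_withdrawal lt rt daily n m out) := by unfold Spec_find_min_withdrawal; infer_instance

-- ===== CLAIM (what is proved, stated in full; the proofs are below) =====
def Claim_equal_find_min_withdrawal : Prop := ∀ (lt : Int) (rt : Int) (daily : List Int) (n : Int) (m : Int), Dom_find_min_withdrawal lt rt daily n m → Pre_find_min_withdrawal lt rt daily n m → Spec_find_min_withdrawal lt rt daily n m (find_min_withdrawal lt rt daily n m)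

-- ===== LEMMAS AND PROOFS =====

-- B's helper recursion computes the .2 (num) component of A's fold
theorem pvWithdrawCountGo_eq_foldl (mid : Int) (daily : List Int) (idxs : List Int) :
    ∀ num charge : Int,
      pvWithdrawCountGo mid daily idxs num charge =
      (idxs.foldl
        (fun (cn : Int × Int) i =>
          if cn.1 < PySem.List.pyGetD daily i 0 then
            (mid - PySem.List.pyGetD daily i 0, cn.2 + 1)
          else
            (cn.1 - PySem.List.pyGetD daily i 0, cn.2)) (charge, num)).2 := by
  induction idxs with
  | nil => intro num charge; rfl
  | cons i rest ih =>
    intro num charge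
    simp only [pvWithdrawCountGo, List.foldl]
    by_cases h : charge < PySem.List.pyGetD daily i 0
    · simp only [h, if_pos]
      exact ih (num + 1) (mid - PySem.List.pyGetD daily i 0)
    · simp only [h, if_neg, not_false_iff]
      exact ih num (charge - PySem.List.pyGetD daily i 0)

theorem find_min_withdrawal_eq (lt rt : Int) (daily : List Int) (n m : Int) :
    find_min_withdrawal lt rt daily n m = find_min_withdrawal_alt lt rt daily n m := by
  fun_induction find_min_withdrawal lt rt daily n m with
  | case1 lt rt h =>
    rw [find_min_withdrawal_alt]
    simp [show ¬ lt ≤ rt by omega]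
  | case2 lt rt h mid s hcond ih =>
    rw [find_min_withdrawal_alt]
    simp only [show lt ≤ rt by omega, if_pos]
    have hmid : PySem.Int.floordiv (lt + rt) 2 = mid := rfl
    rw [hmid]
    have hcnt : pvWithdrawCount mid daily n = s.2 := by
      simpa [pvWithdrawCount, s] using
        pvWithdrawCountGo_eq_foldl mid daily (PySem.List.pyRange 0 n 1) 1 mid
    rw [hcnt, if_pos hcond]
    exact ih
  | case3 lt rt h mid s hcond ih =>
    rw [find_min_withdrawal_alt]
    simp only [show lt ≤ rt by omega, if_pos]
    have hmid : PySem.Int.floordiv (lt + rt) 2 = mid := rfl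
    rw [hmid]
    have hcnt : pvWithdrawCount mid daily n = s.2 := by
      simpa [pvWithdrawCount, s] using
        pvWithdrawCountGo_eq_foldl mid daily (PySem.List.pyRange 0 n 1) 1 mid
    rw [hcnt, if_neg hcond]
    exact ih

-- ===== VERDICT (by name: the statement is the Claim_ definition above) =====
theorem find_min_withdrawal_spec : Claim_equal_find_min_withdrawal := by
  intro lt rt daily n m _ _
  unfold Spec_find_min_withdrawal
  exact find_min_withdrawal_eq lt rt daily n m
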